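-- pv_equiv track=rewrite | github.com/puddletag/puddletag | puddlestuff/tagmodel.py | tag_in_file
-- ===== SOURCE A (Python) =====
-- def tag_in_file(tag, audio):
--     if tag in audio:
--         return tag
--     smalltag = tag.lower()
--     try:
--         return [z for z in audio if z.lower() == smalltag][0]
--     except IndexError:
--         return None
-- ===== SOURCE B (Python) =====
-- def tag_in_file(tag, audio):
--     smalltag = tag.lower()
--     match = None
--     for z in audio:
--         if z == tag:
--             return tag
--         if match is None and z.lower() == smalltag:
--             match = z
--     return match
-- ===== Notes on version B (the rewrite author's own statement) =====
-- stated objective: simpler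
-- what changed: Replaced the membership test plus list-comprehension scan (two traversals and an IndexError-handled [0]) by one single pass keeping a first-case-insensitive-match candidate and returning early on an exact key match.
import Mathlib
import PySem

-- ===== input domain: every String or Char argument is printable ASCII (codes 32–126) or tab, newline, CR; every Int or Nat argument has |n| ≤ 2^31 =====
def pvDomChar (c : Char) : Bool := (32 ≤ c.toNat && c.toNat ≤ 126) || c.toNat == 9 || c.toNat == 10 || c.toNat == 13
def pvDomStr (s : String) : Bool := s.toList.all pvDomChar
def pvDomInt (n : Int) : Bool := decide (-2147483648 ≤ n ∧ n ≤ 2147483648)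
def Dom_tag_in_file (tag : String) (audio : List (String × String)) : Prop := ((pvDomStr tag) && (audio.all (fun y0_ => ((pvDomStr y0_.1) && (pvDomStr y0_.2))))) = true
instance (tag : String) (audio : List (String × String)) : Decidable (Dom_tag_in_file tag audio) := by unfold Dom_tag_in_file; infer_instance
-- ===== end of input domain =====

-- B: one single pass with an early return on exact match and a first-candidate variable,
-- instead of A's membership test plus a second comprehension scan (simpler; return value only).


-- ===== PORT A =====
-- `tag in audio` on a dict tests keys; the comprehension iterates keys; `[...][0]` with
-- IndexError → None is List.head?.
def tag_in_file (tag : String) (audio : List (String × String)) : Option String :=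
  if tag ∈ audio.map Prod.fst then some tag
  else
    let smalltag := PySem.Str.lower tag
    ((audio.map Prod.fst).filter (fun z => PySem.Str.lower z == smalltag)).head?

-- ===== PORT B =====
def tag_in_file_altGo (tag smalltag : String) (m : Option String) :
    List (String × String) → Option String
  | [] => m
  | (z, _) :: rest =>
    if z == tag then some tag
    else if m.isNone && (PySem.Str.lower z == smalltag) then
      tag_in_file_altGo tag smalltag (some z) rest
    else
      tag_in_file_altGo tag smalltag m rest

def tag_in_file_alt (tag : String) (audio : List (String × String)) : Option String :=
  tag_in_file_altGo tag (PySem.Str.lower tag) none audio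

-- ===== PRECONDITION & SPEC =====
def Spec_tag_in_file (tag : String) (audio : List (String × String)) (out : Option String) : Prop := out = tag_in_file_alt tag audio
instance (tag : String) (audio : List (String × String)) (out : Option String) : Decidable (Spec_tag_in_file tag audio out) := by unfold Spec_tag_in_file; infer_instance

-- ===== CLAIM (what is proved, stated in full; the proofs are below) =====
def Claim_equal_tag_in_file : Prop := ∀ (tag : String) (audio : List (String × String)), Dom_tag_in_file tag audio → Spec_tag_in_file tag audio (tag_in_file tag audio)

-- ===== LEMMAS AND PROOFS =====
theorem altGo_mem (tag smalltag : String) (l : List (String × String))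
    (h : tag ∈ l.map Prod.fst) (m : Option String) :
    tag_in_file_altGo tag smalltag m l = some tag := by
  induction l generalizing m with
  | nil => simp at h
  | cons p rest ih =>
    obtain ⟨z, v⟩ := p
    simp only [List.map_cons, List.mem_cons] at h
    by_cases hz : z == tag
    · simp [tag_in_file_altGo, hz]
    · have h' : tag ∈ rest.map Prod.fst := by
        rcases h with h | h
        · exact absurd (beq_iff_eq.mpr h.symm) hz
        · exact h
      simp only [tag_in_file_altGo, hz, if_false, Bool.false_eq_true]
      split <;> exact ih h' _

theorem altGo_not_mem (tag smalltag : String) (l : List (String × String))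
    (h : tag ∉ l.map Prod.fst) (m : Option String) :
    tag_in_file_altGo tag smalltag m l =
      (match m with
       | some x => some x
       | none => ((l.map Prod.fst).filter (fun z => PySem.Str.lower z == smalltag)).head?) := by
  induction l generalizing m with
  | nil => cases m <;> simp [tag_in_file_altGo]
  | cons p rest ih =>
    obtain ⟨z, v⟩ := p
    simp only [List.map_cons, List.mem_cons, not_or] at h
    obtain ⟨h1, h2⟩ := h
    have hz : (z == tag) = false := by
      simp; exact fun e => h1 e.symm
    cases m with
    | some x =>
      simp [tag_in_file_altGo, hz, ih h2]
    | none =>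
      by_cases hl : PySem.Str.lower z == smalltag
      · simp [tag_in_file_altGo, hz, hl, ih h2]
      · simp [tag_in_file_altGo, hz, hl, ih h2]

-- ===== VERDICT (by name: the statement is the Claim_ definition above) =====
theorem tag_in_file_spec : Claim_equal_tag_in_file := by
  intro tag audio _
  unfold Spec_tag_in_file tag_in_file tag_in_file_alt
  by_cases h : tag ∈ audio.map Prod.fst
  · simp [h, altGo_mem tag (PySem.Str.lower tag) audio h none]
  · simp [h, altGo_not_mem tag (PySem.Str.lower tag) audio h none]
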